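-- pv_equiv track=rewrite | github.com/int-brain-lab/paper-reproducible-ephys | scratch_scripts/SB/yield_metric.py | cumulative_and_position
-- ===== SOURCE A (Python) =====
-- def cumulative_and_position(l):
--     """Take a list, find out how many things there are at specific values."""
--     pos = [min(l)]
--     vals = [0]
--     for x in sorted(l):
--         if pos[-1] == x:
--             vals[-1] += 1
--         else:
--             pos.append(x)
--             vals.append(vals[-1] + 1)
--     return pos, vals
-- ===== SOURCE B (Python) =====
-- def cumulative_and_position(l):
--     """Take a list, find out how many things there are at specific values."""
--     cnt = {}
--     for x in l:
--         cnt[x] = cnt.get(x, 0) + 1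
--     keys = sorted(cnt)
--     vals = []
--     run = 0
--     for k in keys:
--         run += cnt[k]
--         vals.append(run)
--     return keys, vals
-- ===== Notes on version B (the rewrite author's own statement) =====
-- stated objective: alternative
-- what changed: Replaces A's sort-then-scan with running last-value comparison by a frequency dictionary built in one pass, whose sorted keys are the positions and whose counts are prefix-summed into the cumulative values; no min() and no last-element mutation.
-- crash fix: On the empty list A raises ValueError (min([])) while B returns ([], []). — e.g. on cumulative_and_position([]): A raises ValueError, B returns ([], [])
import Mathlib
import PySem

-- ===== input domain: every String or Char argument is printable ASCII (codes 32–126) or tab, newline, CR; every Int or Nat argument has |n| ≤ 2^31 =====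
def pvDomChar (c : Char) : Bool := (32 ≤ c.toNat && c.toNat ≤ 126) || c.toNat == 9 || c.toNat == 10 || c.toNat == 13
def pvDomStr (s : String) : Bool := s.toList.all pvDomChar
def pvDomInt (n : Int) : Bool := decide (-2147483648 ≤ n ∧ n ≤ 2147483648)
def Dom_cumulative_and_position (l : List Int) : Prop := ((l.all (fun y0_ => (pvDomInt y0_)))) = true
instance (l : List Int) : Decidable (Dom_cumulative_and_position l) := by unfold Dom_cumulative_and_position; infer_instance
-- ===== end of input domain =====

-- B replaces A's sorted scan with a running last-value comparison by a frequency
-- dictionary plus a prefix-sum pass over its sorted keys (alternative decomposition,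
-- same asymptotic cost); B returns ([], []) where A raises ValueError on [].


-- ===== PORT A =====
-- pos[-1] / vals[-1] are ported with getLast?/dropLast: both lists are nonempty at
-- every access, so this is exact; min([]) raising ValueError is the `none` branch,
-- excluded by Pre_.
def cumulative_and_position (l : List Int) : List Int × List Int :=
  match PySem.List.min? l (fun x => x) with
  | none => ([], [])
  | some m =>
    (PySem.List.sorted l (fun x => x) false).foldl
      (fun pv x =>
        if pv.1.getLast? = some x then
          (pv.1, pv.2.dropLast ++ [pv.2.getLast?.getD 0 + 1])
        else
          (pv.1 ++ [x], pv.2 ++ [pv.2.getLast?.getD 0 + 1]))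
      ([m], [(0 : Int)])

-- ===== PORT B =====
def cumulative_and_position_alt (l : List Int) : List Int × List Int :=
  let cnt := l.foldl (fun d x => d.insert x (d.getD x 0 + 1)) (PySem.Dict.empty (κ := Int) (ν := Int))
  let keys := PySem.List.sorted cnt.keys (fun k => k) false
  let vr := keys.foldl (fun (s : List Int × Int) k =>
      (s.1 ++ [s.2 + cnt.getD k 0], s.2 + cnt.getD k 0)) ([], 0)
  (keys, vr.1)

-- ===== PRECONDITION & SPEC =====
-- Pre_ excludes only the empty list, on which A raises ValueError via min([]).
def Pre_cumulative_and_position (l : List Int) : Prop := l ≠ []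
instance (l : List Int) : Decidable (Pre_cumulative_and_position l) := by unfold Pre_cumulative_and_position; infer_instance
def pvWitness_cumulative_and_position : List Int := [3, 1, 2, 1]

-- On the empty list A raises ValueError (min of an empty sequence) while B returns ([], []).
def Raises_cumulative_and_position (l : List Int) : Prop := l = []
instance (l : List Int) : Decidable (Raises_cumulative_and_position l) := by unfold Raises_cumulative_and_position; infer_instance
def pvRaiseWitness_cumulative_and_position : List Int := []
def pvRaiseWitnessOut_cumulative_and_position : List Int × List Int := ([], [])

def Spec_cumulative_and_position (l : List Int) (out : List Int × List Int) : Prop := out = cumulative_and_position_alt l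
instance (l : List Int) (out : List Int × List Int) : Decidable (Spec_cumulative_and_position l out) := by unfold Spec_cumulative_and_position; infer_instance

-- ===== CLAIM (what is proved, stated in full; the proofs are below) =====
def Claim_equal_cumulative_and_position : Prop := ∀ (l : List Int), Dom_cumulative_and_position l → Pre_cumulative_and_position l → Spec_cumulative_and_position l (cumulative_and_position l)
def Claim_raises_cumulative_and_position : Prop := (∀ (l : List Int), Dom_cumulative_and_position l → Raises_cumulative_and_position l → ¬ Pre_cumulative_and_position l) ∧ (Dom_cumulative_and_position (pvRaiseWitness_cumulative_and_position) ∧ Raises_cumulative_and_position (pvRaiseWitness_cumulative_and_position) ∧ cumulative_and_position_alt (pvRaiseWitness_cumulative_and_position) = pvRaiseWitnessOut_cumulative_and_position)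

-- ===== LEMMAS AND PROOFS =====

-- run of A's loop, abstracted: current value `cur`, cumulative count `c`
def goAB (cur c : Int) : List Int → List Int × List Int
  | [] => ([cur], [c])
  | x :: rest =>
    if cur = x then goAB cur (c + 1) rest
    else
      let g := goAB x (c + 1) rest
      (cur :: g.1, c :: g.2)

-- sorted-order dedup (first element of each run); fuel = list length
def ddpF : Nat → List Int → List Int
  | _, [] => []
  | 0, _ :: _ => []
  | n + 1, x :: xs => x :: ddpF n (xs.filter (fun y => y ≠ x))

def ddp (s : List Int) : List Int := ddpF s.length s

-- prefix sums starting from c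
def cum (c : Int) : List Int → List Int
  | [] => []
  | v :: vs => (c + v) :: cum (c + v) vs

lemma ddpF_fuel (n : Nat) : ∀ s : List Int, s.length ≤ n → ddpF n s = ddp s := by
  induction n using Nat.strong_induction_on with
  | _ n ih =>
    intro s hs
    match n, s with
    | n, [] => cases n <;> rfl
    | Nat.succ m, x :: xs =>
      have hlen : xs.length ≤ m := by simpa using hs
      have hf : (xs.filter (fun y => y ≠ x)).length ≤ xs.length := List.length_filter_le _ _
      have h1 := ih m (Nat.lt_succ_self m) (xs.filter (fun y => y ≠ x)) (le_trans hf hlen)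
      have h2 := ih xs.length (Nat.lt_succ_of_le hlen) (xs.filter (fun y => y ≠ x)) hf
      show x :: ddpF m (xs.filter (fun y => y ≠ x)) = ddp (x :: xs)
      rw [h1]
      have hdd : ddp (x :: xs) = x :: ddpF xs.length (xs.filter (fun y => y ≠ x)) := rfl
      rw [hdd, h2]

lemma ddp_cons (x : Int) (xs : List Int) :
    ddp (x :: xs) = x :: ddp (xs.filter (fun y => y ≠ x)) := by
  rw [ddp]
  simp only [List.length_cons, ddpF]
  rw [ddpF_fuel xs.length _ (List.length_filter_le _ _)]

lemma mem_ddp_aux (n : Nat) : ∀ s : List Int, s.length ≤ n → ∀ y, (y ∈ ddp s ↔ y ∈ s) := by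
  induction n with
  | zero =>
    intro s hs y
    have : s = [] := List.eq_nil_of_length_eq_zero (Nat.le_zero.mp hs)
    subst this; rfl
  | succ m ih =>
    intro s hs y
    match s with
    | [] => rfl
    | x :: xs =>
      have hlen : xs.length ≤ m := by simpa using hs
      rw [ddp_cons]
      have hih := ih (xs.filter (fun y => y ≠ x))
        (le_trans (List.length_filter_le _ _) hlen) y
      simp only [List.mem_cons, hih, List.mem_filter, decide_eq_true_eq]
      tauto

lemma mem_ddp (s : List Int) (y : Int) : y ∈ ddp s ↔ y ∈ s :=
  mem_ddp_aux s.length s le_rfl y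

lemma nodup_ddp_aux (n : Nat) : ∀ s : List Int, s.length ≤ n → (ddp s).Nodup := by
  induction n with
  | zero =>
    intro s hs
    have : s = [] := List.eq_nil_of_length_eq_zero (Nat.le_zero.mp hs)
    subst this; exact List.nodup_nil
  | succ m ih =>
    intro s hs
    match s with
    | [] => exact List.nodup_nil
    | x :: xs =>
      have hlen : xs.length ≤ m := by simpa using hs
      rw [ddp_cons]
      refine List.nodup_cons.mpr ⟨?_, ih _ (le_trans (List.length_filter_le _ _) hlen)⟩
      intro hx
      have := (mem_ddp _ _).mp hx
      simp only [List.mem_filter, decide_eq_true_eq] at this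
      exact this.2 rfl

lemma nodup_ddp (s : List Int) : (ddp s).Nodup := nodup_ddp_aux s.length s le_rfl

lemma pairwise_lt_ddp_aux (n : Nat) : ∀ s : List Int, s.length ≤ n →
    s.Pairwise (· ≤ ·) → (ddp s).Pairwise (· < ·) := by
  induction n with
  | zero =>
    intro s hs _
    have : s = [] := List.eq_nil_of_length_eq_zero (Nat.le_zero.mp hs)
    subst this; exact List.Pairwise.nil
  | succ m ih =>
    intro s hs hp
    match s with
    | [] => exact List.Pairwise.nil
    | x :: xs =>
      have hlen : xs.length ≤ m := by simpa using hs
      rw [List.pairwise_cons] at hp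
      rw [ddp_cons]
      refine List.pairwise_cons.mpr ⟨?_, ih _ (le_trans (List.length_filter_le _ _) hlen)
        (hp.2.sublist List.filter_sublist)⟩
      intro y hy
      have := (mem_ddp _ _).mp hy
      simp only [List.mem_filter, decide_eq_true_eq] at this
      exact lt_of_le_of_ne (hp.1 y this.1) (Ne.symm this.2)

lemma pairwise_lt_ddp (s : List Int) (h : s.Pairwise (· ≤ ·)) : (ddp s).Pairwise (· < ·) :=
  pairwise_lt_ddp_aux s.length s le_rfl h

lemma foldA (rest : List Int) : ∀ (p0 v0 : List Int) (cur c : Int),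
    rest.foldl (fun pv x =>
        if pv.1.getLast? = some x then
          (pv.1, pv.2.dropLast ++ [pv.2.getLast?.getD 0 + 1])
        else
          (pv.1 ++ [x], pv.2 ++ [pv.2.getLast?.getD 0 + 1]))
        (p0 ++ [cur], v0 ++ [c])
    = (p0 ++ (goAB cur c rest).1, v0 ++ (goAB cur c rest).2) := by
  induction rest with
  | nil => intro p0 v0 cur c; simp [goAB]
  | cons x rest ih =>
    intro p0 v0 cur c
    simp only [List.foldl_cons, List.getLast?_concat, List.dropLast_concat,
      Option.getD_some]
    by_cases hcx : cur = x
    · subst hcx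
      rw [if_pos rfl]
      have hgo : goAB cur c (cur :: rest) = goAB cur (c + 1) rest := by
        simp [goAB]
      rw [hgo]
      exact ih p0 v0 cur (c + 1)
    · have hne : some cur ≠ some x := by simpa using hcx
      simp only [if_neg hne, goAB, if_neg hcx]
      have := ih (p0 ++ [cur]) (v0 ++ [c]) x (c + 1)
      simp only [List.append_assoc, List.singleton_append] at this ⊢
      exact this

lemma go_spec (s : List Int) : ∀ (cur c : Int), s.Pairwise (· ≤ ·) → (∀ y ∈ s, cur ≤ y) →
    goAB cur c s =
      (cur :: ddp (s.filter (fun y => cur < y)),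
       (c + (s.count cur : Int)) ::
         cum (c + (s.count cur : Int))
           ((ddp (s.filter (fun y => cur < y))).map (fun k => (s.count k : Int)))) := by
  induction s with
  | nil => intro cur c _ _; simp [goAB, ddp, ddpF, cum]
  | cons x rest ih =>
    intro cur c hp hbd
    rw [List.pairwise_cons] at hp
    have hcurx : cur ≤ x := hbd x (List.mem_cons_self)
    by_cases hcx : cur = x
    · subst hcx
      have hbd' : ∀ y ∈ rest, cur ≤ y := hp.1
      have hfil : (cur :: rest).filter (fun y => cur < y) = rest.filter (fun y => cur < y) := by
        simp
      have hcnt : ((cur :: rest).count cur : Int) = (rest.count cur : Int) + 1 := by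
        rw [List.count_cons_self]; push_cast; ring
      have hmap : (ddp (rest.filter (fun y => cur < y))).map
            (fun k => ((cur :: rest).count k : Int))
          = (ddp (rest.filter (fun y => cur < y))).map (fun k => (rest.count k : Int)) := by
        apply List.map_congr_left
        intro k hk
        have hmem := (mem_ddp _ _).mp hk
        simp only [List.mem_filter, decide_eq_true_eq] at hmem
        obtain ⟨hk1, hk2⟩ := hmem
        rw [List.count_cons]
        split_ifs with hif
        · simp only [beq_iff_eq] at hif; omega
        · simp
      rw [show goAB cur c (cur :: rest) = goAB cur (c + 1) rest from if_pos rfl,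
        ih cur (c + 1) hp.2 hbd', hfil, hcnt, hmap]
      have : c + ((rest.count cur : Int) + 1) = c + 1 + (rest.count cur : Int) := by ring
      rw [this]
    · have hcurlt : cur < x := lt_of_le_of_ne hcurx hcx
      have hrest_ge_x : ∀ y ∈ rest, x ≤ y := hp.1
      -- the recursive call
      have hg := ih x (c + 1) hp.2 hrest_ge_x
      have hstep : goAB cur c (x :: rest)
          = (cur :: (goAB x (c + 1) rest).1, c :: (goAB x (c + 1) rest).2) := by
        simp [goAB, hcx]
      -- filter over (x :: rest) keeps everything
      have hfrest : rest.filter (fun y => cur < y) = rest := by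
        apply List.filter_eq_self.mpr
        intro y hy
        exact decide_eq_true (lt_of_lt_of_le hcurlt (hrest_ge_x y hy))
      have hfil : (x :: rest).filter (fun y => cur < y) = x :: rest := by
        simp [hcurlt, hfrest]
      -- ddp of (x :: rest)
      have hfeq : rest.filter (fun y => y ≠ x) = rest.filter (fun y => x < y) := by
        apply List.filter_congr
        intro y hy
        have := hrest_ge_x y hy
        simp only [decide_eq_decide]
        omega
      have hddp : ddp (x :: rest) = x :: ddp (rest.filter (fun y => x < y)) := by
        rw [ddp_cons, hfeq]
      -- counts
      have hcnt0 : ((x :: rest).count cur : Int) = 0 := by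
        have : cur ∉ x :: rest := by
          intro hmem
          rcases List.mem_cons.mp hmem with h | h
          · exact hcx h
          · exact absurd (hrest_ge_x cur h) (by omega)
        simp [List.count_eq_zero.mpr this]
      have hcntx : ((x :: rest).count x : Int) = (rest.count x : Int) + 1 := by
        rw [List.count_cons_self]; push_cast; ring
      have hmap : (ddp (rest.filter (fun y => x < y))).map
            (fun k => ((x :: rest).count k : Int))
          = (ddp (rest.filter (fun y => x < y))).map (fun k => (rest.count k : Int)) := by
        apply List.map_congr_left
        intro k hk
        have hmem := (mem_ddp _ _).mp hk
        simp only [List.mem_filter, decide_eq_true_eq] at hmem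
        obtain ⟨hk1, hk2⟩ := hmem
        rw [List.count_cons]
        split_ifs with hif
        · simp only [beq_iff_eq] at hif; omega
        · simp
      rw [hstep, hg, hfil, hddp, hcnt0, List.map_cons, hcntx, hmap]
      simp only [cum]
      have h1 : c + 0 + ((rest.count x : Int) + 1) = c + 1 + (rest.count x : Int) := by ring
      rw [h1]
      simp

lemma cumFold (ks : List Int) (f : Int → Int) : ∀ (v0 : List Int) (r : Int),
    (ks.foldl (fun (s : List Int × Int) k => (s.1 ++ [s.2 + f k], s.2 + f k)) (v0, r)).1
    = v0 ++ cum r (ks.map f) := by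
  induction ks with
  | nil => intro v0 r; simp [cum]
  | cons k ks ih =>
    intro v0 r
    simp only [List.foldl_cons, List.map_cons, cum]
    rw [ih (v0 ++ [r + f k]) (r + f k)]
    simp

-- canonical form both ports reduce to
lemma portA_canon (l : List Int) (h : l ≠ []) :
    cumulative_and_position l =
      (ddp (PySem.List.sorted l (fun x => x) false),
       cum 0 ((ddp (PySem.List.sorted l (fun x => x) false)).map
         (fun k => ((PySem.List.sorted l (fun x => x) false).count k : Int)))) := by
  obtain ⟨m, hm⟩ : ∃ m, PySem.List.min? l (fun x => x) = some m := by
    cases hmin : PySem.List.min? l (fun x => x) with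
    | none => exact absurd ((PySem.List.min?_eq_none_iff l (fun x => x)).mp hmin) h
    | some m => exact ⟨m, rfl⟩
  have hmmem : m ∈ l := PySem.List.min?_mem hm
  have hmin : ∀ y ∈ l, m ≤ y := fun y hy => PySem.List.min?_isMin hm y hy
  set s := PySem.List.sorted l (fun x => x) false with hsdef
  have hsperm : s.Perm l := PySem.List.sorted_perm l (fun x => x) false
  have hsp : s.Pairwise (· ≤ ·) := PySem.List.sorted_pairwise l (fun x => x)
  have hsmem : ∀ y, y ∈ s ↔ y ∈ l := fun y => hsperm.mem_iff
  have hsne : s ≠ [] := fun hnil =>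
    h ((PySem.List.sorted_eq_nil_iff l (fun x => x) false).mp (hsdef ▸ hnil))
  obtain ⟨hh, t, hst⟩ : ∃ hh t, s = hh :: t := by
    cases hs : s with
    | nil => exact absurd hs hsne
    | cons a b => exact ⟨a, b, rfl⟩
  have hhm : hh = m := by
    have h1 : m ≤ hh := hmin hh ((hsmem hh).mp (hst ▸ List.mem_cons_self))
    have h2 : hh ≤ m := by
      have hms : m ∈ s := (hsmem m).mpr hmmem
      rw [hst] at hms hsp
      rcases List.mem_cons.mp hms with h | h
      · omega
      · exact (List.pairwise_cons.mp hsp).1 m h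
    omega
  -- unfold A to the abstract loop
  have hA : cumulative_and_position l = goAB m 0 s := by
    have hfold := foldA s [] [] m 0
    simp only [List.nil_append] at hfold
    rw [cumulative_and_position, hm]
    exact hfold.trans (by simp)
  rw [hA, go_spec s m 0 hsp (fun y hy => hmin y ((hsmem y).mp hy))]
  -- rewrite the go_spec form into the ddp s form
  have hbd : ∀ y ∈ t, m ≤ y := by
    intro y hy
    have := (List.pairwise_cons.mp (hst ▸ hsp)).1 y hy
    rw [hhm] at this
    exact this
  have hfil : s.filter (fun y => m < y) = t.filter (fun y => y ≠ m) := by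
    rw [hst, hhm]
    simp only [List.filter_cons, decide_eq_true_eq]
    rw [if_neg (by omega)]
    apply List.filter_congr
    intro y hy
    have := hbd y hy
    simp only [decide_eq_decide]
    omega
  have hddp : ddp s = m :: ddp (t.filter (fun y => y ≠ m)) := by
    rw [hst, hhm, ddp_cons]
  rw [hfil, hddp]
  simp only [List.map_cons, cum]

lemma portB_canon (l : List Int) :
    cumulative_and_position_alt l =
      (ddp (PySem.List.sorted l (fun x => x) false),
       cum 0 ((ddp (PySem.List.sorted l (fun x => x) false)).map
         (fun k => ((PySem.List.sorted l (fun x => x) false).count k : Int)))) := by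
  set s := PySem.List.sorted l (fun x => x) false with hsdef
  have hsperm : s.Perm l := PySem.List.sorted_perm l (fun x => x) false
  have hsp : s.Pairwise (· ≤ ·) := PySem.List.sorted_pairwise l (fun x => x)
  rw [cumulative_and_position_alt]
  simp only [PySem.Dict.foldl_insert_getD_add_one_eq_counter, PySem.Dict.keys_counter]
  have hkeys : PySem.List.sorted (PySem.Set.ofList l) (fun k => k) false = ddp s := by
    apply PySem.List.sorted_eq_of_perm_of_pairwise_lt
    · apply (List.perm_ext_iff_of_nodup (nodup_ddp s) (PySem.Set.nodup_ofList l)).mpr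
      intro a
      rw [mem_ddp, PySem.Set.mem_ofList, hsperm.mem_iff]
    · exact pairwise_lt_ddp s hsp
  rw [hkeys, cumFold (ddp s) (fun k => (PySem.Dict.counter l).getD k 0) [] 0]
  simp only [List.nil_append]
  congr 1
  congr 1
  apply List.map_congr_left
  intro k _
  rw [PySem.Dict.getD_counter, hsperm.count_eq]

-- ===== VERDICT (by name: the statement is the Claim_ definition above) =====
theorem cumulative_and_position_spec : Claim_equal_cumulative_and_position := by
  intro l _ hpre
  unfold Spec_cumulative_and_position
  rw [portA_canon l hpre, portB_canon l]

def cumulative_and_position_raises : Claim_raises_cumulative_and_position := by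
  unfold Claim_raises_cumulative_and_position
  refine ⟨fun l _ hr => ?_, by decide⟩
  unfold Raises_cumulative_and_position at hr
  unfold Pre_cumulative_and_position
  simp [hr]
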